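-- pv_equiv track=rewrite | github.com/shreegit7/BOT | bot/utils/levels.py | total_xp_for_level
-- ===== SOURCE A (Python) =====
-- def xp_needed_for_next_level(level: int) -> int:
--     level = max(1, level)
--     return 100 + (level - 1) * 75
--
-- def total_xp_for_level(level: int) -> int:
--     if level <= 1:
--         return 0
--
--     total = 0
--     current = 1
--     while current < level:
--         total += xp_needed_for_next_level(current)
--         current += 1
--     return total
-- ===== SOURCE B (Python) =====
-- def total_xp_for_level(level: int) -> int:
--     n = level - 1
--     if n <= 0:
--         return 0
--     return 100 * n + 75 * n * (n - 1) // 2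
-- ===== Notes on version B (the rewrite author's own statement) =====
-- stated objective: faster
-- what changed: Replaced the level-by-level accumulation loop with the closed-form arithmetic-series sum 100*n + 75*n*(n-1)//2 for n = level-1.
import Mathlib
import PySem

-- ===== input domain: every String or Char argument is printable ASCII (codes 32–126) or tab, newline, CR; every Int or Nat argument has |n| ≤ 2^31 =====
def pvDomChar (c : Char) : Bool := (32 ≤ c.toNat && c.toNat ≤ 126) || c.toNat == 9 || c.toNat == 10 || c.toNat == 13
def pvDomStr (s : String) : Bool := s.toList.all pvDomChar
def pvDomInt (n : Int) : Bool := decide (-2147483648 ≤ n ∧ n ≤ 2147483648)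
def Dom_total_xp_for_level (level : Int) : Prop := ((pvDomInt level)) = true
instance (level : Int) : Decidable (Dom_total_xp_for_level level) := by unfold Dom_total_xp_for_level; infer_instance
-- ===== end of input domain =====

-- B replaces A's per-level accumulation loop with the closed-form series sum (objective: faster, O(1) vs O(level)).

-- ===== PORT A =====
def xp_needed_for_next_level (level : Int) : Int :=
  let level := max 1 level
  100 + (level - 1) * 75

def xpLoop (level current total : Int) : Int :=
  if current < level then
    xpLoop level (current + 1) (total + xp_needed_for_next_level current)
  else total
termination_by (level - current).toNat
decreasing_by omega

def total_xp_for_level (level : Int) : Int :=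
  if level ≤ 1 then 0
  else xpLoop level 1 0

-- ===== PORT B =====
def total_xp_for_level_alt (level : Int) : Int :=
  let n := level - 1
  if n ≤ 0 then 0
  else 100 * n + PySem.Int.floordiv (75 * n * (n - 1)) 2

-- ===== PRECONDITION & SPEC =====
def Spec_total_xp_for_level (level : Int) (out : Int) : Prop := out = total_xp_for_level_alt level
instance (level : Int) (out : Int) : Decidable (Spec_total_xp_for_level level out) := by unfold Spec_total_xp_for_level; infer_instance

-- ===== CLAIM (what is proved, stated in full; the proofs are below) =====
def Claim_equal_total_xp_for_level : Prop := ∀ (level : Int), Dom_total_xp_for_level level → Spec_total_xp_for_level level (total_xp_for_level level)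

-- ===== LEMMAS AND PROOFS =====

-- Doubled loop invariant (doubled to stay division-free):
-- for 1 ≤ current ≤ level, 2 * xpLoop level current total
--   = 2*total + (level - current) * (200 + 75*(current - 1) + 75*(level - 2)).
theorem xpLoop_doubled (level : Int) :
    ∀ (k : Nat) (current total : Int), (level - current).toNat = k → 1 ≤ current → current ≤ level →
      2 * xpLoop level current total
        = 2 * total + (level - current) * (200 + 75 * (current - 1) + 75 * (level - 2)) := by
  intro k
  induction k with
  | zero =>
    intro current total hk hc hcl
    have hnl : ¬ current < level := by omega
    rw [xpLoop, if_neg hnl]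
    have h0 : level - current = 0 := by omega
    rw [h0]; ring
  | succ k ih =>
    intro current total hk hc hcl
    have hlt : current < level := by omega
    rw [xpLoop, if_pos hlt]
    have hrec := ih (current + 1) (total + xp_needed_for_next_level current) (by omega) (by omega) (by omega)
    rw [hrec]
    have hmax : max 1 current = current := by omega
    simp only [xp_needed_for_next_level, hmax]
    ring

-- ===== VERDICT (by name: the statement is the Claim_ definition above) =====

theorem total_xp_for_level_spec : Claim_equal_total_xp_for_level := by
  intro level _
  unfold Spec_total_xp_for_level total_xp_for_level total_xp_for_level_alt
  by_cases h : level ≤ 1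
  · simp only [if_pos h]
    rw [if_pos (by omega : level - 1 ≤ 0)]
  · simp only [if_neg h]
    rw [if_neg (by omega : ¬ level - 1 ≤ 0)]
    have h2 := xpLoop_doubled level (level - 1).toNat 1 0 (by omega) (by omega) (by omega)
    -- the numerator is even, so floordiv by 2 is exact
    have heven : ∃ m : Int, 75 * (level - 1) * (level - 1 - 1) = 2 * m := by
      rcases Int.even_or_odd (level - 1) with ⟨m, hm⟩ | ⟨m, hm⟩
      · exact ⟨75 * m * (level - 2), by linear_combination (75 * (level - 2)) * hm⟩
      · exact ⟨75 * (level - 1) * m, by linear_combination (75 * (level - 1)) * hm⟩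
    rcases heven with ⟨m, hm⟩
    have hfd : PySem.Int.floordiv (75 * (level - 1) * (level - 1 - 1)) 2 = m := by
      rw [PySem.Int.floordiv_eq_ediv_of_pos (by omega), hm]
      omega
    rw [hfd]
    have h3 : 2 * xpLoop level 1 0 = 2 * (100 * (level - 1) + m) := by
      rw [h2]; linear_combination hm
    omega
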